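-- pv_equiv track=rewrite | github.com/patrick7star/desligamento-automatico | src/correcao.py | string_comeca_com_numeros
-- ===== SOURCE A (Python) =====
-- def string_comeca_com_numeros(string: str) -> bool:
--    contagem = 0
--    for char in string:
--       if char.isdigit() or char == '.':
--          contagem += 1
--       else:
--          break
--    ...
--    return contagem > 0 and string[0] != '.'
-- ===== SOURCE B (Python) =====
-- def string_comeca_com_numeros(string: str) -> bool:
--     return len(string) > 0 and string[0].isdigit()
-- ===== Notes on version B (the rewrite author's own statement) =====
-- stated objective: simpler
-- what changed: Replaced the leading-run counting loop (count digits/dots, then test count>0 and first char != '.') with a direct test of only the first character: nonempty and string[0].isdigit().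
import Mathlib
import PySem

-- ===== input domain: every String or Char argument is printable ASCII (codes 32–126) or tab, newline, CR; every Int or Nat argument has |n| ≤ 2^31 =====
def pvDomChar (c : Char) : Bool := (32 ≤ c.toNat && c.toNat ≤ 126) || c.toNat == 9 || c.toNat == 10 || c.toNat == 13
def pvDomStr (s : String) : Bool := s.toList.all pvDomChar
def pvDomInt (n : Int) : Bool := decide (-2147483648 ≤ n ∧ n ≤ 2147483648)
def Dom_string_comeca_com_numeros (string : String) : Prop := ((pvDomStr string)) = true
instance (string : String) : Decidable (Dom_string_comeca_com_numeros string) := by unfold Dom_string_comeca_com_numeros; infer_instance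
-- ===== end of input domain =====

-- B replaces A's leading-run counting loop with a direct first-character digit test (simpler).


-- ===== PORT A =====
-- the for-loop with break: count the leading run of chars that are digits or '.'
def pvCountRun : List Char → Nat
  | [] => 0
  | c :: cs =>
      if PySem.Chars.isdigit c || c == '.' then pvCountRun cs + 1 else 0

def string_comeca_com_numeros (string : String) : Bool :=
  let contagem := pvCountRun string.toList
  -- 'contagem > 0 and string[0] != "."': Python short-circuits, so string[0]
  -- is only evaluated when contagem > 0 (then the string is nonempty)
  if contagem > 0 then
    match PySem.Str.pyGet? string 0 with
    | some c => c != '.'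
    | none => false
  else false

-- ===== PORT B =====
def string_comeca_com_numeros_alt (string : String) : Bool :=
  decide (PySem.Str.len string > 0) &&
    (match PySem.Str.pyGet? string 0 with
     | some c => PySem.Chars.isdigit c
     | none => false)

-- ===== PRECONDITION & SPEC =====
def Spec_string_comeca_com_numeros (string : String) (out : Bool) : Prop := out = string_comeca_com_numeros_alt string
instance (string : String) (out : Bool) : Decidable (Spec_string_comeca_com_numeros string out) := by unfold Spec_string_comeca_com_numeros; infer_instance

-- ===== CLAIM (what is proved, stated in full; the proofs are below) =====
def Claim_equal_string_comeca_com_numeros : Prop := ∀ (string : String), Dom_string_comeca_com_numeros string → Spec_string_comeca_com_numeros string (string_comeca_com_numeros string)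

-- ===== LEMMAS AND PROOFS =====

theorem pvPorts_eq (string : String) :
    string_comeca_com_numeros string = string_comeca_com_numeros_alt string := by
  unfold string_comeca_com_numeros string_comeca_com_numeros_alt
  cases h : string.toList with
  | nil =>
      simp [PySem.Str.pyGet?, PySem.Str.len, h, pvCountRun]
  | cons c cs =>
      have hget : PySem.Str.pyGet? string 0 = some c := by
        simp [PySem.Str.pyGet?, h]
      have hlen : PySem.Str.len string = (cs.length : Int) + 1 := by
        simp [PySem.Str.len, h]
      rw [hget, hlen]
      simp only [pvCountRun]
      by_cases hd : PySem.Chars.isdigit c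
      · have hne : c ≠ '.' := by
          intro he; subst he; simp [PySem.Chars.isdigit] at hd
        simp [hd, hne]
      · by_cases hdot : c = '.'
        · subst hdot; simp [hd]
        · simp [hd, hdot]

-- ===== VERDICT (by name: the statement is the Claim_ definition above) =====
theorem string_comeca_com_numeros_spec : Claim_equal_string_comeca_com_numeros := by
  intro s _
  unfold Spec_string_comeca_com_numeros
  exact pvPorts_eq s
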